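-- pv_equiv track=rewrite | github.com/pypi-data/pypi-mirror-250 | packages/conterm/conterm-0.1.0.tar.gz/conterm-0.1.0/conterm/pretty/markup/macro.py | map_modifers
-- ===== SOURCE A (Python) =====
-- from enum import Enum
--
-- MOD_CODE_MAP = {
--     "Bold": "1",
--     "Dim": "2",
--     "Italic": "3",
--     "Underline": "4",
--     "SBlink": "5",
--     "RBlink": "6",
--     "Blink": "6;5",
--     "Reverse": "7",
--     "Strike": "9",
--     "U_Bold": "22",
--     "U_Dim": "22",
--     "U_Italic": "23",
--     "U_Underline": "24",
--     "U_SBlink": "25",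
--     "U_RBlink": "25",
--     "U_Blink": "25",
--     "U_Reverse": "27",
--     "U_Strike": "29",
-- }
--
-- def map_modifers(op: int, cl: int) -> list[str]:
--     result = []
--
--     for mod in ModifierOpen:
--         if mod.value & op and mod.value & cl == 0:
--             result.append(MOD_CODE_MAP[mod.name])
--     for mod in ModifierClose:
--         if mod.value & cl and mod.value & op == 0:
--             result.append(MOD_CODE_MAP[mod.name])
--     return result
--
-- class ModifierOpen(Enum):
--     """Data class of modifier opening flags for integer packing."""
--     Bold = 1
--     Dim = 2
--     Italic = 4
--     Underline = 8
--     SBlink = 16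
--     RBlink = 32
--     Blink = 64
--     Reverse = 128
--     Strike = 256
--
-- class ModifierClose(Enum):
--     """Data class of modifier closing flags for integer packing."""
--     U_Bold = 1
--     U_Dim = 2
--     U_Italic = 4
--     U_Underline = 8
--     U_SBlink = 16
--     U_RBlink = 32
--     U_Blink = 64
--     U_Reverse = 128
--     U_Strike = 256
-- ===== SOURCE B (Python) =====
-- # Value-keyed code tables + low-bit peeling over the masked "open only" /
-- # "close only" bit sets, instead of scanning all nine enum members twice.
-- OPEN_CODES = {1: "1", 2: "2", 4: "3", 8: "4", 16: "5", 32: "6", 64: "6;5", 128: "7", 256: "9"}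
-- CLOSE_CODES = {1: "22", 2: "22", 4: "23", 8: "24", 16: "25", 32: "25", 64: "25", 128: "27", 256: "29"}
--
-- def map_modifers(op: int, cl: int) -> list[str]:
--     o = op & 0x1FF
--     c = cl & 0x1FF
--     result = []
--     m = o & (c ^ 0x1FF)          # bits opened and not simultaneously closed
--     while m:
--         b = m & -m               # lowest set bit -> ascending enum order
--         result.append(OPEN_CODES[b])
--         m ^= b
--     m = c & (o ^ 0x1FF)          # bits closed and not simultaneously opened
--     while m:
--         b = m & -m
--         result.append(CLOSE_CODES[b])
--         m ^= b
--     return result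
-- ===== Notes on version B (the rewrite author's own statement) =====
-- stated objective: alternative
-- what changed: Instead of scanning all nine members of each enum and testing every value against both bitmasks, B masks op and cl to 9 bits once, forms the open-only and close-only bit sets, and peels their set bits low-to-high with m & -m, looking each bit value up in a value-keyed code table.
import Mathlib
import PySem

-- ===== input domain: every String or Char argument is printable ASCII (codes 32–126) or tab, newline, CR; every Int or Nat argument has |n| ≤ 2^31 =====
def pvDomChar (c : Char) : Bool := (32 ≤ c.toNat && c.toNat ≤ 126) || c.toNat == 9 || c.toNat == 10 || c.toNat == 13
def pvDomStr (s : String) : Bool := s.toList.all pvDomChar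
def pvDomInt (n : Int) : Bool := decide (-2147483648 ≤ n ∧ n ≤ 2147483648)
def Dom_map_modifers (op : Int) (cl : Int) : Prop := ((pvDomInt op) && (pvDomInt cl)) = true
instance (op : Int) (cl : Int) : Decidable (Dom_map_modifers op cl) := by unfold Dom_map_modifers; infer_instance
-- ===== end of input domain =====

-- B replaces A's double scan over all nine enum members by value-keyed code
-- tables and low-bit peeling of the masked open-only / close-only bit sets
-- (objective: alternative / idiomatic bit manipulation; same cost class).

-- ===== PORT A =====
def MOD_CODE_MAP : PySem.Dict String String := PySem.Dict.ofList
  [("Bold","1"),("Dim","2"),("Italic","3"),("Underline","4"),("SBlink","5"),("RBlink","6"),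
   ("Blink","6;5"),("Reverse","7"),("Strike","9"),("U_Bold","22"),("U_Dim","22"),("U_Italic","23"),
   ("U_Underline","24"),("U_SBlink","25"),("U_RBlink","25"),("U_Blink","25"),("U_Reverse","27"),("U_Strike","29")]

-- the Enum iteration orders of ModifierOpen / ModifierClose, as (value, name) lists
def ModifierOpenL : List (Int × String) :=
  [(1,"Bold"),(2,"Dim"),(4,"Italic"),(8,"Underline"),(16,"SBlink"),(32,"RBlink"),(64,"Blink"),(128,"Reverse"),(256,"Strike")]
def ModifierCloseL : List (Int × String) :=
  [(1,"U_Bold"),(2,"U_Dim"),(4,"U_Italic"),(8,"U_Underline"),(16,"U_SBlink"),(32,"U_RBlink"),(64,"U_Blink"),(128,"U_Reverse"),(256,"U_Strike")]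

def map_modifers (op : Int) (cl : Int) : List String :=
  let result : List String := []
  let result := ModifierOpenL.foldl (fun result m =>
    if PySem.Int.band m.1 op ≠ 0 ∧ PySem.Int.band m.1 cl = 0
    -- MOD_CODE_MAP[mod.name]: every enum name is a key, so KeyError is unreachable
    then result ++ [(MOD_CODE_MAP.get? m.2).getD ""]
    else result) result
  ModifierCloseL.foldl (fun result m =>
    if PySem.Int.band m.1 cl ≠ 0 ∧ PySem.Int.band m.1 op = 0
    then result ++ [(MOD_CODE_MAP.get? m.2).getD ""]
    else result) result

-- ===== PORT B =====
def OPEN_CODES : PySem.Dict Int String := PySem.Dict.ofList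
  [(1,"1"),(2,"2"),(4,"3"),(8,"4"),(16,"5"),(32,"6"),(64,"6;5"),(128,"7"),(256,"9")]
def CLOSE_CODES : PySem.Dict Int String := PySem.Dict.ofList
  [(1,"22"),(2,"22"),(4,"23"),(8,"24"),(16,"25"),(32,"25"),(64,"25"),(128,"27"),(256,"29")]

-- Source B's 'while m:' loop; the masked m has at most 9 set bits and loses one per
-- iteration, so fuel 9 only makes the identical computation total.
def peel (fuel : Nat) (codes : PySem.Dict Int String) (m : Int) (result : List String) : List String :=
  match fuel with
  | 0 => result
  | fuel + 1 =>
    if m ≠ 0 then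
      let b := PySem.Int.band m (-m)
      peel fuel codes (PySem.Int.bxor m b) (result ++ [(codes.get? b).getD ""])
    else result

def map_modifers_alt (op : Int) (cl : Int) : List String :=
  let o := PySem.Int.band op 511
  let c := PySem.Int.band cl 511
  let result : List String := []
  let result := peel 9 OPEN_CODES (PySem.Int.band o (PySem.Int.bxor c 511)) result
  peel 9 CLOSE_CODES (PySem.Int.band c (PySem.Int.bxor o 511)) result

-- ===== PRECONDITION & SPEC =====
def Spec_map_modifers (op : Int) (cl : Int) (out : List String) : Prop := out = map_modifers_alt op cl
instance (op : Int) (cl : Int) (out : List String) : Decidable (Spec_map_modifers op cl out) := by unfold Spec_map_modifers; infer_instance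

-- ===== CLAIM (what is proved, stated in full; the proofs are below) =====
def Claim_equal_map_modifers : Prop := ∀ (op : Int) (cl : Int), Dom_map_modifers op cl → Spec_map_modifers op cl (map_modifers op cl)

-- ===== LEMMAS AND PROOFS =====

-- n &&& 511 keeps the low 9 bits
theorem and511 (n : Nat) : n &&& 511 = n % 512 := by
  have h := Nat.and_two_pow_sub_one_eq_mod n 9
  norm_num at h
  exact h

-- x & 511 in Python is the low 9 bits, i.e. x mod 512
theorem band_511 (a : Int) : PySem.Int.band a 511 = a % 512 := by
  by_cases h : 0 ≤ a
  · rw [PySem.Int.band_of_nonneg h (by norm_num)]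
    rw [show (511:Int).toNat = 511 from rfl, and511]; omega
  · unfold PySem.Int.band
    rw [if_neg h, if_pos (by norm_num : (0:Int) ≤ 511)]
    rw [show (511:Int).toNat = 511 from rfl, Nat.and_comm, and511]; omega

-- bounded 9-bit complement fact
set_option maxRecDepth 100000 in
theorem sub_testBit : ∀ r : Fin 512, ∀ i : Fin 9,
    (511 - (r : Nat)).testBit (i : Nat) = !((r : Nat).testBit (i : Nat)) := by decide

-- v & a for a single-bit v = 2^i picks out bit i of a's low 9 bits
theorem band_pow (a : Int) (i : Nat) (h : i < 9) :
    PySem.Int.band ((2:Int)^i) a = if ((a % 512).toNat).testBit i then (2:Int)^i else 0 := by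
  have h2i : ((2:Int)^i).toNat = 2^i := by
    have : (2:Int)^i = ((2^i : Nat) : Int) := by push_cast; ring
    rw [this, Int.toNat_natCast]
  have h512 : (512:Nat) = 2^9 := by norm_num
  by_cases ha : 0 ≤ a
  · rw [PySem.Int.band_of_nonneg (by positivity) ha, h2i, Nat.two_pow_and]
    have hmod : (a % 512).toNat = a.toNat % 512 := by omega
    rw [hmod, h512, Nat.testBit_mod_two_pow]
    simp only [h, decide_true, Bool.true_and]
    cases hb : a.toNat.testBit i <;> simp
  · unfold PySem.Int.band
    rw [if_pos (by positivity), if_neg ha, h2i, Nat.two_pow_and]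
    have hr : (a % 512).toNat = 511 - (-a-1).toNat % 512 := by omega
    rw [hr]
    have hbt := sub_testBit ⟨(-a-1).toNat % 512, by omega⟩ ⟨i, h⟩
    rw [hbt]
    have hmm : ((-a-1).toNat % 512).testBit i = (-a-1).toNat.testBit i := by
      rw [h512, Nat.testBit_mod_two_pow]
      simp [h]
    rw [hmm]
    cases hb : (-a-1).toNat.testBit i <;> simp

theorem band_pow_ne (a : Int) (i : Nat) (h : i < 9) :
    (PySem.Int.band ((2:Int)^i) a ≠ 0) ↔ ((a % 512).toNat).testBit i = true := by
  rw [band_pow a i h]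
  have h2 : (2:Int)^i ≠ 0 := by positivity
  by_cases hb : ((a % 512).toNat).testBit i <;> simp [hb, h2]

theorem band_pow_eq (a : Int) (i : Nat) (h : i < 9) :
    (PySem.Int.band ((2:Int)^i) a = 0) ↔ ((a % 512).toNat).testBit i = false := by
  rw [band_pow a i h]
  have h2 : (2:Int)^i ≠ 0 := by positivity
  by_cases hb : ((a % 512).toNat).testBit i <;> simp [hb, h2]

-- bit i of x &&& (y ^^^ 511), as the pair of bits of x and y
theorem mask_ne (x y : Nat) (i : Nat) (h : i < 9) :
    ((x &&& (y ^^^ 511)) &&& 2^i ≠ 0) ↔ (x.testBit i = true ∧ y.testBit i = false) := by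
  have h511 : (511:Nat) = 2^9 - 1 := by norm_num
  rw [Nat.and_two_pow, Nat.testBit_and, Nat.testBit_xor, h511, Nat.testBit_two_pow_sub_one]
  simp only [h, decide_true]
  cases hx : x.testBit i <;> cases hy : y.testBit i <;> simp

-- A's per-member test, in terms of the low-9-bit masks of op and cl
theorem condA (op cl : Int) (i : Nat) (h : i < 9) :
    (PySem.Int.band ((2:Int)^i) op ≠ 0 ∧ PySem.Int.band ((2:Int)^i) cl = 0) ↔
    (((op % 512).toNat &&& ((cl % 512).toNat ^^^ 511)) &&& 2^i ≠ 0) := by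
  rw [band_pow_ne op i h, band_pow_eq cl i h, mask_ne _ _ i h]

-- A's loop shape: conditional append-fold = filter-then-map
theorem foldl_if_append {α : Type} (f : α → String) (P : α → Prop) [DecidablePred P] :
    ∀ (l : List α) (acc : List String),
    l.foldl (fun r m => if P m then r ++ [f m] else r) acc =
      acc ++ (l.filter (fun m => decide (P m))).map f := by
  intro l
  induction l with
  | nil => simp
  | cons a l ih =>
    intro acc
    by_cases h : P a <;> simp [h, ih]

-- peeling appends to the accumulator only
theorem peel_acc : ∀ (fuel : Nat) (codes : PySem.Dict Int String) (m : Int) (r : List String),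
    peel fuel codes m r = r ++ peel fuel codes m [] := by
  intro fuel
  induction fuel with
  | zero => simp [peel]
  | succ n ih =>
    intro codes m r
    by_cases h : m = 0
    · simp [peel, h]
    · rw [peel, peel, if_pos h, if_pos h, ih, ih codes _ ([] ++ _)]
      simp

def OPENV : List (Nat × String) := [(1,"1"),(2,"2"),(4,"3"),(8,"4"),(16,"5"),(32,"6"),(64,"6;5"),(128,"7"),(256,"9")]
def CLOSEV : List (Nat × String) := [(1,"22"),(2,"22"),(4,"23"),(8,"24"),(16,"25"),(32,"25"),(64,"25"),(128,"27"),(256,"29")]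

set_option maxHeartbeats 4000000 in
set_option maxRecDepth 100000 in
theorem peel_eq : ∀ m : Fin 512,
    peel 9 OPEN_CODES ((m : Nat) : Int) [] =
      (OPENV.filter (fun p => decide ((m:Nat) &&& p.1 ≠ 0))).map Prod.snd ∧
    peel 9 CLOSE_CODES ((m : Nat) : Int) [] =
      (CLOSEV.filter (fun p => decide ((m:Nat) &&& p.1 ≠ 0))).map Prod.snd := by decide

-- filter-then-map congruence across two lists of the same length
theorem fm_congr {α β : Type} (f1 : α → String) (f2 : β → String) (p1 : α → Bool) (p2 : β → Bool) :
    ∀ (l1 : List α) (l2 : List β), l1.length = l2.length →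
    (∀ k (hk1 : k < l1.length) (hk2 : k < l2.length),
       p1 l1[k] = p2 l2[k] ∧ f1 l1[k] = f2 l2[k]) →
    (l1.filter p1).map f1 = (l2.filter p2).map f2 := by
  intro l1
  induction l1 with
  | nil => intro l2 hl _; cases l2 <;> simp_all
  | cons a l ih =>
    intro l2 hl hk
    cases l2 with
    | nil => simp at hl
    | cons b l2 =>
      have h0 := hk 0 (by simp) (by simp)
      simp only [List.getElem_cons_zero] at h0
      have ht := ih l2 (by simpa using hl) (fun k hk1 hk2 => by
        have := hk (k+1) (by simpa using hk1) (by simpa using hk2)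
        simpa using this)
      simp only [List.filter_cons, h0.1]
      cases hb : p2 b <;> simp [ht, h0.2]

-- ===== VERDICT (by name: the statement is the Claim_ definition above) =====
theorem map_modifers_spec : Claim_equal_map_modifers := by
  intro op cl _
  unfold Spec_map_modifers
  have hox : PySem.Int.band op 511 = (((op % 512).toNat : Nat) : Int) := by rw [band_511]; omega
  have hoy : PySem.Int.band cl 511 = (((cl % 512).toNat : Nat) : Int) := by rw [band_511]; omega
  set x := (op % 512).toNat with hxdef
  set y := (cl % 512).toNat with hydef
  have hxlt : x < 512 := by omega
  have hylt : y < 512 := by omega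
  have hmo : PySem.Int.band (x:Int) (PySem.Int.bxor (y:Int) 511) = ((x &&& (y ^^^ 511) : Nat) : Int) := by
    rw [show ((511:Int)) = ((511:Nat):Int) by norm_num, PySem.Int.bxor_natCast, PySem.Int.band_natCast]
  have hmc : PySem.Int.band (y:Int) (PySem.Int.bxor (x:Int) 511) = ((y &&& (x ^^^ 511) : Nat) : Int) := by
    rw [show ((511:Int)) = ((511:Nat):Int) by norm_num, PySem.Int.bxor_natCast, PySem.Int.band_natCast]
  have hmolt : x &&& (y ^^^ 511) < 512 := lt_of_le_of_lt Nat.and_le_left hxlt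
  have hmclt : y &&& (x ^^^ 511) < 512 := lt_of_le_of_lt Nat.and_le_left hylt
  have hBo := (peel_eq ⟨x &&& (y ^^^ 511), hmolt⟩).1
  have hBc := (peel_eq ⟨y &&& (x ^^^ 511), hmclt⟩).2
  simp only [map_modifers_alt, hox, hoy, hmo, hmc] at *
  rw [peel_acc 9 CLOSE_CODES _ (peel 9 OPEN_CODES _ []), hBo, hBc]
  simp only [map_modifers]
  rw [foldl_if_append, foldl_if_append, List.nil_append]
  have hopen : (ModifierOpenL.filter (fun m => decide (PySem.Int.band m.1 op ≠ 0 ∧ PySem.Int.band m.1 cl = 0))).map (fun m => (MOD_CODE_MAP.get? m.2).getD "") =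
      (OPENV.filter (fun p => decide ((x &&& (y ^^^ 511)) &&& p.1 ≠ 0))).map Prod.snd := by
    apply fm_congr
    · decide
    · intro k hk1 hk2
      simp only [ModifierOpenL] at hk1
      simp only [List.length_cons, List.length_nil] at hk1
      interval_cases k <;>
        simp only [ModifierOpenL, OPENV, List.getElem_cons_zero, List.getElem_cons_succ] <;>
        refine ⟨?_, by decide⟩ <;>
        rw [decide_eq_decide]
      · exact (by simpa using condA op cl 0 (by norm_num))
      · exact (by simpa using condA op cl 1 (by norm_num))
      · exact (by simpa using condA op cl 2 (by norm_num))
      · exact (by simpa using condA op cl 3 (by norm_num))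
      · exact (by simpa using condA op cl 4 (by norm_num))
      · exact (by simpa using condA op cl 5 (by norm_num))
      · exact (by simpa using condA op cl 6 (by norm_num))
      · exact (by simpa using condA op cl 7 (by norm_num))
      · exact (by simpa using condA op cl 8 (by norm_num))
  have hclose : (ModifierCloseL.filter (fun m => decide (PySem.Int.band m.1 cl ≠ 0 ∧ PySem.Int.band m.1 op = 0))).map (fun m => (MOD_CODE_MAP.get? m.2).getD "") =
      (CLOSEV.filter (fun p => decide ((y &&& (x ^^^ 511)) &&& p.1 ≠ 0))).map Prod.snd := by
    apply fm_congr
    · decide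
    · intro k hk1 hk2
      simp only [ModifierCloseL] at hk1
      simp only [List.length_cons, List.length_nil] at hk1
      interval_cases k <;>
        simp only [ModifierCloseL, CLOSEV, List.getElem_cons_zero, List.getElem_cons_succ] <;>
        refine ⟨?_, by decide⟩ <;>
        rw [decide_eq_decide]
      · exact (by simpa using condA cl op 0 (by norm_num))
      · exact (by simpa using condA cl op 1 (by norm_num))
      · exact (by simpa using condA cl op 2 (by norm_num))
      · exact (by simpa using condA cl op 3 (by norm_num))
      · exact (by simpa using condA cl op 4 (by norm_num))
      · exact (by simpa using condA cl op 5 (by norm_num))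
      · exact (by simpa using condA cl op 6 (by norm_num))
      · exact (by simpa using condA cl op 7 (by norm_num))
      · exact (by simpa using condA cl op 8 (by norm_num))
  rw [hopen, hclose]
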